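-- pv_equiv track=rewrite | github.com/anishxii/sena | neuro_validate/src/evaluate.py | _leave_one_group_out_splits
-- ===== SOURCE A (Python) =====
-- from collections import defaultdict
--
-- def _leave_one_group_out_splits(groups: list[str]) -> list[tuple[list[int], list[int]]]:
--     group_to_indices: dict[str, list[int]] = defaultdict(list)
--     for index, group in enumerate(groups):
--         group_to_indices[group].append(index)
--     splits = []
--     all_indices = set(range(len(groups)))
--     for held_out_group, test_indices in sorted(group_to_indices.items()):
--         train_indices = sorted(all_indices - set(test_indices))
--         if not train_indices or not test_indices:
--             continue
--         splits.append((train_indices, list(test_indices)))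
--     return splits
-- ===== SOURCE B (Python) =====
-- def _leave_one_group_out_splits(groups: list[str]) -> list[tuple[list[int], list[int]]]:
--     distinct = sorted(set(groups))
--     if len(distinct) < 2:
--         return []
--     splits = []
--     for g in distinct:
--         train, test = [], []
--         for i, h in enumerate(groups):
--             (test if h == g else train).append(i)
--         splits.append((train, test))
--     return splits
-- ===== Notes on version B (the rewrite author's own statement) =====
-- stated objective: alternative
-- what changed: Replaces the defaultdict grouping plus per-group set-difference-and-sort with one partition pass over enumerate(groups) per sorted distinct group; no sets, no dict and no per-group sort.
import Mathlib
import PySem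

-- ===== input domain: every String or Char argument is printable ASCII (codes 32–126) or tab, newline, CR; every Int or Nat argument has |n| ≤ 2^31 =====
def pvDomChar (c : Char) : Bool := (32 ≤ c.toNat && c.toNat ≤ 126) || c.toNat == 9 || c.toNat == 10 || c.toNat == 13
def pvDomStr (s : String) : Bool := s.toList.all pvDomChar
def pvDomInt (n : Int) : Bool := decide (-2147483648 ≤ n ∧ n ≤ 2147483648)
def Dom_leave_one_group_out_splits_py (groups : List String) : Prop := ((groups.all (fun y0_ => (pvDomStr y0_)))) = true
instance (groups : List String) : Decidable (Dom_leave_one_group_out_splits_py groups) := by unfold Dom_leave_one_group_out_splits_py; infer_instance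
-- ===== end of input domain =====

-- B replaces A's defaultdict grouping + per-group set difference and sort by one partition
-- pass over enumerate(groups) per sorted distinct group (objective: alternative decomposition).

-- ===== PORT A =====
-- sorted(group_to_indices.items()) compares (str, list) pairs; keys are distinct, so it is
-- exactly the stable sort by the key string (ties never reach the list component).
def leave_one_group_out_splits_py (groups : List String) : List (List Int × List Int) :=
  let group_to_indices : PySem.Dict String (List Int) :=
    (PySem.List.enumerate groups).foldl
      (fun d p => d.modify p.2 [] (fun l => l ++ [p.1])) PySem.Dict.empty
  let all_indices : PySem.Set Int :=
    PySem.Set.ofList (PySem.List.pyRange 0 (PySem.List.len groups) 1)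
  (PySem.List.sorted group_to_indices.items (fun p => p.1) false).foldl
    (fun splits p =>
      let train_indices :=
        PySem.List.sorted (PySem.Set.diff all_indices (PySem.Set.ofList p.2)) (fun x => x) false
      if train_indices.isEmpty || p.2.isEmpty then splits
      else splits ++ [(train_indices, p.2)]) []

-- ===== PORT B =====
def leave_one_group_out_splits_py_alt (groups : List String) : List (List Int × List Int) :=
  let distinct := PySem.List.sorted (PySem.Set.ofList groups) (fun g => g) false
  if distinct.length < 2 then []
  else
    distinct.map (fun g =>
      (PySem.List.enumerate groups).foldl
        (fun (tt : List Int × List Int) p =>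
          if p.2 == g then (tt.1, tt.2 ++ [p.1]) else (tt.1 ++ [p.1], tt.2)) ([], []))

-- ===== PRECONDITION & SPEC =====
def Spec_leave_one_group_out_splits_py (groups : List String) (out : List (List Int × List Int)) : Prop := out = leave_one_group_out_splits_py_alt groups
instance (groups : List String) (out : List (List Int × List Int)) : Decidable (Spec_leave_one_group_out_splits_py groups out) := by unfold Spec_leave_one_group_out_splits_py; infer_instance

-- ===== CLAIM (what is proved, stated in full; the proofs are below) =====
def Claim_equal_leave_one_group_out_splits_py : Prop := ∀ (groups : List String), Dom_leave_one_group_out_splits_py groups → Spec_leave_one_group_out_splits_py groups (leave_one_group_out_splits_py groups)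

-- ===== LEMMAS AND PROOFS =====

theorem pv_fold_pair (g : String) (l : List (Int × String)) (a b : List Int) :
    l.foldl (fun (tt : List Int × List Int) p =>
      if p.2 == g then (tt.1, tt.2 ++ [p.1]) else (tt.1 ++ [p.1], tt.2)) (a, b)
    = (a ++ (l.filter (fun p => !(p.2 == g))).map (·.1),
       b ++ (l.filter (fun p => p.2 == g)).map (·.1)) := by
  induction l generalizing a b with
  | nil => simp
  | cons p l ih =>
    by_cases h : p.2 = g
    · rw [List.foldl_cons, if_pos (by simp [h]), ih]; simp [h]
    · rw [List.foldl_cons, if_neg (by simp [h]), ih]; simp [h]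

theorem pv_enum_filter (groups : List String) (q : String → Bool) :
    ((PySem.List.enumerate groups).filter (fun p => q p.2)).map (·.1)
    = (PySem.List.pyRange 0 (PySem.List.len groups)).filter
        (fun j => q (PySem.List.pyGetD groups j "")) := by
  rw [PySem.List.enumerate_eq_map_pyRange groups ""]
  simp [List.filter_map, List.map_map, Function.comp_def]

theorem pv_dict_getD (groups : List String) (g : String) :
    ((PySem.List.enumerate groups).foldl
      (fun d p => d.modify p.2 [] (fun l => l ++ [p.1])) PySem.Dict.empty).getD g []
    = ((PySem.List.enumerate groups).filter (fun p => p.2 == g)).map (·.1) := by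
  have h := PySem.Dict.getD_foldl_modify_append
    ((PySem.List.enumerate groups).map (fun p => (p.2, p.1))) PySem.Dict.empty g
  rw [List.foldl_map] at h
  simpa [List.filter_map, List.map_map, Function.comp_def] using h

theorem pv_train (groups : List String) (g : String) :
    PySem.List.sorted
      (PySem.Set.diff (PySem.Set.ofList (PySem.List.pyRange 0 (PySem.List.len groups)))
        (PySem.Set.ofList (((PySem.List.enumerate groups).filter (fun p => p.2 == g)).map (·.1))))
      (fun x => x)
    = (PySem.List.pyRange 0 (PySem.List.len groups)).filter
        (fun j => !(PySem.List.pyGetD groups j "" == g)) := by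
  rw [PySem.Set.ofList_eq_self_of_nodup _ (PySem.List.nodup_pyRange_one 0 _)]
  have hdiff : PySem.Set.diff (PySem.List.pyRange 0 (PySem.List.len groups))
      (PySem.Set.ofList (((PySem.List.enumerate groups).filter (fun p => p.2 == g)).map (·.1)))
      = (PySem.List.pyRange 0 (PySem.List.len groups)).filter
          (fun j => !(PySem.List.pyGetD groups j "" == g)) := by
    show (PySem.List.pyRange 0 (PySem.List.len groups)).filter _ = _
    apply List.filter_congr
    intro x hx
    have hmem : x ∈ PySem.Set.ofList (((PySem.List.enumerate groups).filter (fun p => p.2 == g)).map (·.1))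
        ↔ (PySem.List.pyGetD groups x "" == g) = true := by
      rw [PySem.Set.mem_ofList, pv_enum_filter groups (fun s => s == g), List.mem_filter]
      exact ⟨fun h => h.2, fun h => ⟨hx, h⟩⟩
    simp only [PySem.Set.contains]
    by_cases hq : (PySem.List.pyGetD groups x "" == g) = true <;> simp [hmem, hq]
  rw [hdiff]
  exact PySem.List.sorted_eq_self_of_pairwise _ _
    (((PySem.List.pairwise_lt_pyRange_one 0 _).filter _).imp (fun h => le_of_lt h))

theorem pv_exists_index (groups : List String) {x : String} (hx : x ∈ groups) :
    ∃ j ∈ PySem.List.pyRange 0 (PySem.List.len groups), PySem.List.pyGetD groups j "" = x := by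
  obtain ⟨k, hk, rfl⟩ := List.mem_iff_getElem.mp hx
  refine ⟨(k : Int), ?_, ?_⟩
  · rw [PySem.List.mem_pyRange_one]
    constructor
    · positivity
    · simp [PySem.List.len_eq]; exact_mod_cast hk
  · rw [PySem.List.pyGetD_natCast]; exact List.getD_eq_getElem _ _ hk

theorem pv_getD_mem (groups : List String) {j : Int}
    (hj : j ∈ PySem.List.pyRange 0 (PySem.List.len groups)) :
    PySem.List.pyGetD groups j "" ∈ groups := by
  obtain ⟨h1, h2⟩ := PySem.List.mem_pyRange_one.mp hj
  apply PySem.List.pyGetD_mem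
  simp only [PySem.List.len_eq] at h2
  simp only [PySem.Raise.InRange]
  omega

theorem pv_filter_ne_nil (groups : List String) (q : Int → Bool)
    (h : ∃ j ∈ PySem.List.pyRange 0 (PySem.List.len groups), q j = true) :
    ((PySem.List.pyRange 0 (PySem.List.len groups)).filter q).isEmpty = false := by
  obtain ⟨j, hj, hq⟩ := h
  have : j ∈ (PySem.List.pyRange 0 (PySem.List.len groups)).filter q :=
    List.mem_filter.mpr ⟨hj, hq⟩
  rcases hfe : ((PySem.List.pyRange 0 (PySem.List.len groups)).filter q).isEmpty with _ | _
  · rfl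
  · rw [List.isEmpty_iff] at hfe
    rw [hfe] at this
    cases this

theorem pv_assemble (groups : List String) (D : List String)
    (hperm : D.Perm (PySem.Set.ofList groups))
    (hlt : D.Pairwise (· < ·)) :
    D.foldl (fun acc g =>
      if ((PySem.List.pyRange 0 (PySem.List.len groups)).filter
            (fun j => !(PySem.List.pyGetD groups j "" == g))).isEmpty
         || ((PySem.List.pyRange 0 (PySem.List.len groups)).filter
            (fun j => (PySem.List.pyGetD groups j "" == g))).isEmpty
      then acc
      else acc ++ [(((PySem.List.pyRange 0 (PySem.List.len groups)).filter
            (fun j => !(PySem.List.pyGetD groups j "" == g))),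
          ((PySem.List.pyRange 0 (PySem.List.len groups)).filter
            (fun j => (PySem.List.pyGetD groups j "" == g))))]) []
    = if D.length < 2 then []
      else D.map (fun g =>
        (((PySem.List.pyRange 0 (PySem.List.len groups)).filter
            (fun j => !(PySem.List.pyGetD groups j "" == g))),
         ((PySem.List.pyRange 0 (PySem.List.len groups)).filter
            (fun j => (PySem.List.pyGetD groups j "" == g))))) := by
  have hmemg : ∀ g ∈ D, g ∈ groups := fun g hg =>
    (PySem.Set.mem_ofList groups g).mp (hperm.mem_iff.mp hg)
  match D, hperm, hlt, hmemg with
  | [], _, _, _ => simp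
  | [g], hperm, _, hmemg =>
    have hall : ∀ x ∈ groups, x = g := by
      intro x hxg
      have hx : x ∈ PySem.Set.ofList groups := (PySem.Set.mem_ofList groups x).mpr hxg
      have := hperm.mem_iff.mpr hx
      simpa using this
    have htr : ((PySem.List.pyRange 0 (PySem.List.len groups)).filter
        (fun j => !(PySem.List.pyGetD groups j "" == g))).isEmpty = true := by
      rw [List.isEmpty_iff, List.filter_eq_nil_iff]
      intro j hj
      have := hall _ (pv_getD_mem groups hj)
      simp [this]
    simp only [List.foldl_cons, List.foldl_nil]
    rw [htr]
    simp
  | g :: g' :: rest, hperm, hlt, hmemg =>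
    have hne : g ≠ g' := ne_of_lt (List.rel_of_pairwise_cons hlt (List.mem_cons_self))
    rw [if_neg (by simp)]
    rw [PySem.List.foldl_congr_mem _ _
      (fun acc g0 => acc ++ [(((PySem.List.pyRange 0 (PySem.List.len groups)).filter
            (fun j => !(PySem.List.pyGetD groups j "" == g0))),
          ((PySem.List.pyRange 0 (PySem.List.len groups)).filter
            (fun j => (PySem.List.pyGetD groups j "" == g0))))]) []
      ?_]
    · rw [PySem.List.foldl_append_singleton_eq_map]; rfl
    · intro acc g0 hg0
      have hte : ((PySem.List.pyRange 0 (PySem.List.len groups)).filter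
          (fun j => (PySem.List.pyGetD groups j "" == g0))).isEmpty = false := by
        apply pv_filter_ne_nil
        obtain ⟨j, hj, he⟩ := pv_exists_index groups (hmemg g0 hg0)
        exact ⟨j, hj, by simp [he]⟩
      have htr : ((PySem.List.pyRange 0 (PySem.List.len groups)).filter
          (fun j => !(PySem.List.pyGetD groups j "" == g0))).isEmpty = false := by
        apply pv_filter_ne_nil
        have hother : ∃ g1, g1 ∈ groups ∧ g1 ≠ g0 := by
          by_cases hgg : g0 = g
          · exact ⟨g', hmemg g' (by simp), by rw [hgg]; exact fun h => hne h.symm⟩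
          · exact ⟨g, hmemg g (by simp), fun h => hgg h.symm⟩
        obtain ⟨g1, hg1, hne1⟩ := hother
        obtain ⟨j, hj, he⟩ := pv_exists_index groups hg1
        exact ⟨j, hj, by simp [he, hne1]⟩
      rw [htr, hte]
      simp

theorem pv_sorted_items (groups : List String) :
    PySem.List.sorted
      (((PySem.List.enumerate groups).foldl
        (fun d p => d.modify p.2 [] (fun l => l ++ [p.1])) PySem.Dict.empty).items)
      (fun p => p.1)
    = (PySem.List.sorted (PySem.Set.ofList groups) (fun g => g)).map
        (fun g => (g, ((PySem.List.enumerate groups).filter (fun p => p.2 == g)).map (·.1))) := by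
  have hkeys : ((PySem.List.enumerate groups).foldl
      (fun d p => d.modify p.2 [] (fun l => l ++ [p.1])) PySem.Dict.empty).keys
      = PySem.Set.ofList groups := by
    rw [PySem.Dict.keys_foldl_modify_key (PySem.List.enumerate groups)
      (fun p : Int × String => p.2) ([] : List Int)
      (fun _ p => fun l => l ++ [p.1]) PySem.Dict.empty]
    rw [PySem.List.map_snd_enumerate]
    rfl
  have hnodup : ((PySem.List.enumerate groups).foldl
      (fun d p => d.modify p.2 [] (fun l => l ++ [p.1])) PySem.Dict.empty).keys.Nodup := by
    rw [hkeys]; exact PySem.Set.nodup_ofList groups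
  rw [PySem.Dict.items_eq_map_keys _ hnodup [], hkeys]
  rw [List.map_congr_left (fun g _ => by rw [pv_dict_getD] :
    ∀ g ∈ PySem.Set.ofList groups, _ = (g, ((PySem.List.enumerate groups).filter (fun p => p.2 == g)).map (·.1)))]
  apply PySem.List.sorted_eq_of_perm_of_pairwise_lt
  · exact (PySem.List.sorted_perm _ _ _).map _
  · rw [List.pairwise_map]
    simpa using PySem.List.sorted_ofList_pairwise_lt groups

theorem pv_enum_filter_pos (groups : List String) (g : String) :
    ((PySem.List.enumerate groups).filter (fun p => p.2 == g)).map (·.1)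
    = (PySem.List.pyRange 0 (PySem.List.len groups)).filter
        (fun j => PySem.List.pyGetD groups j "" == g) :=
  pv_enum_filter groups (fun s => s == g)

theorem pv_enum_filter_neg (groups : List String) (g : String) :
    ((PySem.List.enumerate groups).filter (fun p => !(p.2 == g))).map (·.1)
    = (PySem.List.pyRange 0 (PySem.List.len groups)).filter
        (fun j => !(PySem.List.pyGetD groups j "" == g)) :=
  pv_enum_filter groups (fun s => !(s == g))

theorem pv_main (groups : List String) :
    leave_one_group_out_splits_py groups = leave_one_group_out_splits_py_alt groups := by
  simp only [leave_one_group_out_splits_py, leave_one_group_out_splits_py_alt]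
  rw [pv_sorted_items, List.foldl_map]
  simp only [pv_fold_pair, List.nil_append]
  simp only [pv_train]
  simp only [pv_enum_filter_pos, pv_enum_filter_neg]
  exact pv_assemble groups _ (PySem.List.sorted_perm _ _ _)
    (PySem.List.sorted_ofList_pairwise_lt groups)

-- ===== VERDICT (by name: the statement is the Claim_ definition above) =====
theorem leave_one_group_out_splits_py_spec : Claim_equal_leave_one_group_out_splits_py := by
  intro groups _hdom
  exact pv_main groups
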